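-- pv_equiv track=rewrite | github.com/TaeWoongYoun/programmersGather | 프로그래머스/0/181932. 코드 처리하기/코드 처리하기.py | solution
-- ===== SOURCE A (Python) =====
-- def solution(code):
--     answer = ''
--     mode = 0
--
--     for i in range(len(code)):
--         if code[i] == "1":
--             mode = 1 - mode
--         else:
--             if i % 2 == mode:
--                 answer += code[i]
--
--     if answer == "":
--         return 'EMPTY'
--
--     return answer
-- ===== SOURCE B (Python) =====
-- def solution(code):
--     # Pass 1: exclusive prefix-parity table of '1' counts.
--     par = []
--     cnt = 0
--     for c in code:
--         par.append(cnt % 2)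
--         cnt += 1 if c == '1' else 0
--     # Pass 2: filter by the precomputed parity.
--     res = ''.join(code[i] for i in range(len(code))
--                   if code[i] != '1' and i % 2 == par[i])
--     return res if res else 'EMPTY'
-- ===== Notes on version B (the rewrite author's own statement) =====
-- stated objective: alternative
-- what changed: Replaced the single stateful loop (toggle variable mutated while filtering) by a two-phase structure: first a pass building an exclusive prefix-parity table of toggle-character counts, then a separate filter/join pass over indices using that table.
import Mathlib
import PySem

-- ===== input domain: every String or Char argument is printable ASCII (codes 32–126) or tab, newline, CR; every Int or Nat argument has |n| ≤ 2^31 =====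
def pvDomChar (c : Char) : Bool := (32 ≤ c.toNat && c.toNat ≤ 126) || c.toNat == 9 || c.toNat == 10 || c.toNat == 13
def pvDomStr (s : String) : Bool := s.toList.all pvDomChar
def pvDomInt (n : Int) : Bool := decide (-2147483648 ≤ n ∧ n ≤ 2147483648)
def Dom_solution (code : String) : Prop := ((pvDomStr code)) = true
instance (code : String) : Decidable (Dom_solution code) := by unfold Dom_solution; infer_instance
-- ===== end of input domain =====

-- B replaces A's inline stateful toggle by a precompute-parity-table-then-filter two-phase structure (alternative decomposition, same cost).


-- ===== PORT A =====
-- A's for-loop over range(len(code)) with state (answer, mode): structural recursion carrying the index.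
def solutionLoop : List Char → Int → (List Char × Int) → (List Char × Int)
  | [], _, st => st
  | c :: cs, i, (ans, mode) =>
    if c = '1' then solutionLoop cs (i + 1) (ans, 1 - mode)
    else if i % 2 = mode then solutionLoop cs (i + 1) (ans ++ [c], mode)
    else solutionLoop cs (i + 1) (ans, mode)

def solution (code : String) : String :=
  let st := solutionLoop code.toList 0 ([], 0)
  if st.1 = [] then "EMPTY" else String.mk st.1

-- ===== PORT B =====
-- Pass 1 of B: exclusive prefix-parity table (par.append(cnt % 2); cnt += bit).
def buildPar : List Char → Int → List Int
  | [], _ => []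
  | c :: cs, cnt => cnt % 2 :: buildPar cs (cnt + (if c = '1' then 1 else 0))

-- Pass 2 of B: the filtering join over indices, reading the precomputed table.
def collectPar : List Char → List Int → Int → List Char
  | c :: cs, p :: ps, i =>
    if c ≠ '1' ∧ i % 2 = p then c :: collectPar cs ps (i + 1) else collectPar cs ps (i + 1)
  | _, _, _ => []

def solution_alt (code : String) : String :=
  let cs := code.toList
  let par := buildPar cs 0
  let res := collectPar cs par 0
  if res = [] then "EMPTY" else String.mk res

-- ===== PRECONDITION & SPEC =====
def Spec_solution (code : String) (out : String) : Prop := out = solution_alt code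
instance (code : String) (out : String) : Decidable (Spec_solution code out) := by unfold Spec_solution; infer_instance

-- ===== CLAIM (what is proved, stated in full; the proofs are below) =====
def Claim_equal_solution : Prop := ∀ (code : String), Dom_solution code → Spec_solution code (solution code)

-- ===== LEMMAS AND PROOFS =====
-- Invariant: A's mode equals the parity of the running '1'-count that B tabulates.
lemma loop_eq_collect (cs : List Char) : ∀ (i cnt : Int) (ans : List Char),
    (solutionLoop cs i (ans, cnt % 2)).1 = ans ++ collectPar cs (buildPar cs cnt) i := by
  induction cs with
  | nil => intro i cnt ans; simp [solutionLoop, collectPar]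
  | cons c cs ih =>
    intro i cnt ans
    by_cases h1 : c = '1'
    · have hm : (1 : Int) - cnt % 2 = (cnt + 1) % 2 := by omega
      simp [solutionLoop, buildPar, collectPar, h1, hm, ih]
    · simp only [solutionLoop, buildPar, collectPar, h1]
      by_cases h2 : i % 2 = cnt % 2
      · simp [h1, h2, ih]
      · simp [h1, h2, ih]

-- ===== VERDICT (by name: the statement is the Claim_ definition above) =====
theorem solution_spec : Claim_equal_solution := by
  intro code _
  unfold Spec_solution solution solution_alt
  have h := loop_eq_collect code.toList 0 0 []
  norm_num at h
  simp [h]
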